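-- pv_equiv track=rewrite | github.com/moments8890/doctor-ai-agent | services/knowledge/guideline_diff.py | diff_guideline_snapshots
-- ===== SOURCE A (Python) =====
-- from typing import Dict, List
--
-- def diff_guideline_snapshots(old_sections: Dict[str, str], new_sections: Dict[str, str]) -> List[Dict[str, str]]:
--     """Compare section text and emit impact-scored change summaries."""
--     changes: List[Dict[str, str]] = []
--     all_keys = sorted(set(old_sections) | set(new_sections))
--     for key in all_keys:
--         old = old_sections.get(key)
--         new = new_sections.get(key)
--         if old is None and new is not None:
--             changes.append({
--                 "section": key,
--                 "change_type": "added",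
--                 "impact": "moderate",
--                 "summary": "New recommendation section added",
--             })
--             continue
--         if old is not None and new is None:
--             changes.append({
--                 "section": key,
--                 "change_type": "removed",
--                 "impact": "high",
--                 "summary": "Section removed; requires clinician review",
--             })
--             continue
--         if old != new:
--             impact = "critical" if any(token in (new or "") for token in ["禁忌", "contraindication", "avoid"]) else "low"
--             changes.append({
--                 "section": key,
--                 "change_type": "updated",
--                 "impact": impact,
--                 "summary": "Section content changed",
--             })
--     return changes
-- ===== SOURCE B (Python) =====
-- def diff_guideline_snapshots(old_sections, new_sections):
--     """Set-partition the keys (added / removed / common-changed), build each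
--     group's records in its own pass, then merge with one sort by section."""
--     old_keys = set(old_sections)
--     new_keys = set(new_sections)
--     added = [
--         {"section": k, "change_type": "added", "impact": "moderate",
--          "summary": "New recommendation section added"}
--         for k in new_keys - old_keys
--     ]
--     removed = [
--         {"section": k, "change_type": "removed", "impact": "high",
--          "summary": "Section removed; requires clinician review"}
--         for k in old_keys - new_keys
--     ]
--     changed = []
--     for k in old_keys & new_keys:
--         new = new_sections[k]
--         if old_sections[k] != new:
--             impact = "critical" if any(
--                 t in new for t in ("禁忌", "contraindication", "avoid")
--             ) else "low"
--             changed.append({"section": k, "change_type": "updated",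
--                             "impact": impact, "summary": "Section content changed"})
--     return sorted(added + removed + changed, key=lambda c: c["section"])
-- ===== Notes on version B (the rewrite author's own statement) =====
-- stated objective: alternative
-- what changed: Replaces A's single classifying loop over the sorted key union with a set-partition of the keys (added / removed / common) built in three independent passes, merged and sorted once by section key (section keys are distinct, so the sort order is unique).
import Mathlib
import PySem

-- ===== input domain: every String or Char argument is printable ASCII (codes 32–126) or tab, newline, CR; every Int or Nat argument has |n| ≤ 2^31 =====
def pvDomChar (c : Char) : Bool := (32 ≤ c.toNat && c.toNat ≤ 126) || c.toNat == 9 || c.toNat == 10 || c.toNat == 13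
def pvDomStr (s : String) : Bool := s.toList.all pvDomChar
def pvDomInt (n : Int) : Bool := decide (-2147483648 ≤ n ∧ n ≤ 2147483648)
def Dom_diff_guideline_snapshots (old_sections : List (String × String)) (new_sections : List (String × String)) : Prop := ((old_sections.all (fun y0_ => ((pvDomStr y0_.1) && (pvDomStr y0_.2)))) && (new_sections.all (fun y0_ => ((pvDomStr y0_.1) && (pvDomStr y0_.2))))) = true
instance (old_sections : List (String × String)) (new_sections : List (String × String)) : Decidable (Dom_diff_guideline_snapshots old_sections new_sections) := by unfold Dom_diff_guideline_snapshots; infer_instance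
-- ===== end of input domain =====

-- B re-implements A by a different decomposition (key-set partition + three passes + one merge sort)
-- with the same cost; equivalence of return values is proved on all inputs.

-- ===== PORT A =====
-- literal transliteration of A's single loop over the sorted key union
def diff_guideline_snapshots (old_sections : List (String × String)) (new_sections : List (String × String)) : List (List (String × String)) :=
  let all_keys := PySem.List.sorted
    (PySem.Set.union (PySem.Set.ofList (old_sections.map Prod.fst)) (PySem.Set.ofList (new_sections.map Prod.fst)))
    (fun k => k) false
  all_keys.foldl (fun changes key =>
    match (PySem.Dict.mk old_sections).get? key, (PySem.Dict.mk new_sections).get? key with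
    | none, some _ => changes ++
        [[("section", key), ("change_type", "added"), ("impact", "moderate"),
          ("summary", "New recommendation section added")]]
    | some _, none => changes ++
        [[("section", key), ("change_type", "removed"), ("impact", "high"),
          ("summary", "Section removed; requires clinician review")]]
    | none, none => changes        -- old == new (both None): nothing appended
    | some o, some n =>            -- here A's '(new or "")' is n: new is a str, and a token is never in ""
      if o ≠ n then
        changes ++
          [[("section", key), ("change_type", "updated"),
            ("impact", if ["禁忌", "contraindication", "avoid"].any (fun token => PySem.Str.isIn token n)
                       then "critical" else "low"),
            ("summary", "Section content changed")]]
      else changes) []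

-- ===== PORT B =====
-- B-side helpers: the three record shapes
def pvAddedRec (k : String) : List (String × String) :=
  [("section", k), ("change_type", "added"), ("impact", "moderate"),
   ("summary", "New recommendation section added")]
def pvRemovedRec (k : String) : List (String × String) :=
  [("section", k), ("change_type", "removed"), ("impact", "high"),
   ("summary", "Section removed; requires clinician review")]
def pvUpdatedRec (k impact : String) : List (String × String) :=
  [("section", k), ("change_type", "updated"), ("impact", impact),
   ("summary", "Section content changed")]

-- literal transliteration of Source B: partition the key sets, three passes, merge, one sort by section
def diff_guideline_snapshots_alt (old_sections : List (String × String)) (new_sections : List (String × String)) : List (List (String × String)) :=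
  let old_keys := PySem.Set.ofList (old_sections.map Prod.fst)
  let new_keys := PySem.Set.ofList (new_sections.map Prod.fst)
  let added := (PySem.Set.diff new_keys old_keys).map pvAddedRec
  let removed := (PySem.Set.diff old_keys new_keys).map pvRemovedRec
  let changed := (PySem.Set.inter old_keys new_keys).filterMap (fun k =>
    match (PySem.Dict.mk old_sections).get? k, (PySem.Dict.mk new_sections).get? k with
    | some o, some n =>
      if o ≠ n then
        some (pvUpdatedRec k
          (if ["禁忌", "contraindication", "avoid"].any (fun t => PySem.Str.isIn t n)
           then "critical" else "low"))
      else none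
    | _, _ => none)                -- unreachable: k is a key of both dicts
  -- Python's key c["section"]: every record carries "section", so the default "" is never used
  PySem.List.sorted (added ++ removed ++ changed) (fun c => (PySem.Dict.mk c).getD "section" "") false

-- ===== PRECONDITION & SPEC =====
def Spec_diff_guideline_snapshots (old_sections : List (String × String)) (new_sections : List (String × String)) (out : List (List (String × String))) : Prop := out = diff_guideline_snapshots_alt old_sections new_sections
instance (old_sections : List (String × String)) (new_sections : List (String × String)) (out : List (List (String × String))) : Decidable (Spec_diff_guideline_snapshots old_sections new_sections out) := by unfold Spec_diff_guideline_snapshots; infer_instance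

-- ===== CLAIM (what is proved, stated in full; the proofs are below) =====
def Claim_equal_diff_guideline_snapshots : Prop := ∀ (old_sections : List (String × String)) (new_sections : List (String × String)), Dom_diff_guideline_snapshots old_sections new_sections → Spec_diff_guideline_snapshots old_sections new_sections (diff_guideline_snapshots old_sections new_sections)

-- ===== LEMMAS AND PROOFS =====

-- the record (if any) A emits for key k; A's loop body appends exactly (pvClassify … k).toList
def pvClassify (old_sections new_sections : List (String × String)) (k : String) : Option (List (String × String)) :=
  match (PySem.Dict.mk old_sections).get? k, (PySem.Dict.mk new_sections).get? k with
  | none, some _ => some (pvAddedRec k)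
  | some _, none => some (pvRemovedRec k)
  | none, none => none
  | some o, some n =>
    if o ≠ n then
      some (pvUpdatedRec k
        (if ["禁忌", "contraindication", "avoid"].any (fun t => PySem.Str.isIn t n)
         then "critical" else "low"))
    else none

def pvKeyOf (c : List (String × String)) : String := (PySem.Dict.mk c).getD "section" ""


theorem pv_get?_eq_none (l : List (String × String)) (k : String) :
    (PySem.Dict.mk l).get? k = none ↔ k ∉ l.map Prod.fst := by
  induction l with
  | nil => simp [PySem.Dict.get?]
  | cons p rest ih =>
      rw [show (PySem.Dict.mk (p :: rest)) = PySem.Dict.mk ((p.1, p.2) :: rest) by rfl,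
        PySem.Dict.get?_mk_cons]
      by_cases h : p.1 = k
      · simp [h]
      · have h' : ¬ k = p.1 := fun e => h e.symm
        simp [h, h', ih]

theorem pv_get?_some (l : List (String × String)) (k : String) (h : k ∈ l.map Prod.fst) :
    ∃ v, (PySem.Dict.mk l).get? k = some v := by
  rcases hv : (PySem.Dict.mk l).get? k with _ | v
  · exact absurd ((pv_get?_eq_none l k).mp hv) (by simpa using h)
  · exact ⟨v, rfl⟩

theorem pv_foldl_eq_filterMap (old_sections new_sections : List (String × String)) (l : List String) (acc : List (List (String × String))) :
    l.foldl (fun changes key =>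
      match (PySem.Dict.mk old_sections).get? key, (PySem.Dict.mk new_sections).get? key with
      | none, some _ => changes ++
          [[("section", key), ("change_type", "added"), ("impact", "moderate"),
            ("summary", "New recommendation section added")]]
      | some _, none => changes ++
          [[("section", key), ("change_type", "removed"), ("impact", "high"),
            ("summary", "Section removed; requires clinician review")]]
      | none, none => changes
      | some o, some n =>
        if o ≠ n then
          changes ++
            [[("section", key), ("change_type", "updated"),
              ("impact", if ["禁忌", "contraindication", "avoid"].any (fun token => PySem.Str.isIn token n)
                         then "critical" else "low"),
              ("summary", "Section content changed")]]
        else changes) acc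
    = acc ++ l.filterMap (pvClassify old_sections new_sections) := by
  induction l generalizing acc with
  | nil => simp
  | cons k t ih =>
      simp only [List.foldl_cons, List.filterMap_cons, ih]
      unfold pvClassify
      rcases ho : (PySem.Dict.mk old_sections).get? k with _ | o <;>
        rcases hn : (PySem.Dict.mk new_sections).get? k with _ | n <;>
        simp [pvAddedRec, pvRemovedRec, pvUpdatedRec]
      split_ifs <;> simp

theorem pv_keyOf_classify (old_sections new_sections : List (String × String)) (k : String) (r : List (String × String))
    (h : pvClassify old_sections new_sections k = some r) : pvKeyOf r = k := by
  unfold pvClassify at h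
  rcases ho : (PySem.Dict.mk old_sections).get? k with _ | o <;>
    rcases hn : (PySem.Dict.mk new_sections).get? k with _ | n <;>
    rw [ho, hn] at h
  · exact absurd h (by simp)
  · simp only [Option.some.injEq] at h
    subst h; rfl
  · simp only [Option.some.injEq] at h
    subst h; rfl
  · by_cases he : o = n
    · simp [he] at h
    · simp only [he, ne_eq, not_false_iff, if_true, Option.some.injEq] at h
      subst h; rfl

theorem pv_classify_added (os ns : List (String × String)) (k : String)
    (h1 : k ∉ os.map Prod.fst) (h2 : k ∈ ns.map Prod.fst) :
    pvClassify os ns k = some (pvAddedRec k) := by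
  have ho : (PySem.Dict.mk os).get? k = none := (pv_get?_eq_none os k).mpr h1
  obtain ⟨v, hn⟩ := pv_get?_some ns k h2
  unfold pvClassify
  rw [ho, hn]

theorem pv_classify_removed (os ns : List (String × String)) (k : String)
    (h1 : k ∈ os.map Prod.fst) (h2 : k ∉ ns.map Prod.fst) :
    pvClassify os ns k = some (pvRemovedRec k) := by
  have hn : (PySem.Dict.mk ns).get? k = none := (pv_get?_eq_none ns k).mpr h2
  obtain ⟨v, ho⟩ := pv_get?_some os k h1
  unfold pvClassify
  rw [ho, hn]

-- the classifying function of B's `changed` pass, named for the proof (defeq to the lambda in the port)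
def pvChangedF (old_sections new_sections : List (String × String)) (k : String) : Option (List (String × String)) :=
  match (PySem.Dict.mk old_sections).get? k, (PySem.Dict.mk new_sections).get? k with
  | some o, some n =>
    if o ≠ n then
      some (pvUpdatedRec k
        (if ["禁忌", "contraindication", "avoid"].any (fun t => PySem.Str.isIn t n)
         then "critical" else "low"))
    else none
  | _, _ => none

theorem pv_classify_common (os ns : List (String × String)) (k : String)
    (h1 : k ∈ os.map Prod.fst) (h2 : k ∈ ns.map Prod.fst) :
    pvClassify os ns k = pvChangedF os ns k := by
  obtain ⟨o, ho⟩ := pv_get?_some os k h1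
  obtain ⟨n, hn⟩ := pv_get?_some ns k h2
  unfold pvClassify pvChangedF
  rw [ho, hn]

theorem pv_main (os ns : List (String × String)) :
    diff_guideline_snapshots os ns = diff_guideline_snapshots_alt os ns := by
  have hA : diff_guideline_snapshots os ns
      = (PySem.List.sorted
          (PySem.Set.union (PySem.Set.ofList (os.map Prod.fst)) (PySem.Set.ofList (ns.map Prod.fst)))
          (fun k => k) false).filterMap (pvClassify os ns) := by
    unfold diff_guideline_snapshots
    exact pv_foldl_eq_filterMap os ns _ []
  have hB : diff_guideline_snapshots_alt os ns
      = PySem.List.sorted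
          ((PySem.Set.diff (PySem.Set.ofList (ns.map Prod.fst)) (PySem.Set.ofList (os.map Prod.fst))).map pvAddedRec
            ++ (PySem.Set.diff (PySem.Set.ofList (os.map Prod.fst)) (PySem.Set.ofList (ns.map Prod.fst))).map pvRemovedRec
            ++ (PySem.Set.inter (PySem.Set.ofList (os.map Prod.fst)) (PySem.Set.ofList (ns.map Prod.fst))).filterMap (pvChangedF os ns))
          pvKeyOf false := rfl
  have ndall : (PySem.List.sorted
      (PySem.Set.union (PySem.Set.ofList (os.map Prod.fst)) (PySem.Set.ofList (ns.map Prod.fst)))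
      (fun k => k) false).Nodup :=
    (PySem.List.sorted_perm _ _ _).nodup_iff.mpr
      (PySem.Set.nodup_union _ _ (PySem.Set.nodup_ofList _))
  have ndparts : ((PySem.Set.diff (PySem.Set.ofList (ns.map Prod.fst)) (PySem.Set.ofList (os.map Prod.fst)))
      ++ (PySem.Set.diff (PySem.Set.ofList (os.map Prod.fst)) (PySem.Set.ofList (ns.map Prod.fst)))
      ++ (PySem.Set.inter (PySem.Set.ofList (os.map Prod.fst)) (PySem.Set.ofList (ns.map Prod.fst)))).Nodup := by
    simp only [List.nodup_append]
    refine ⟨⟨PySem.Set.nodup_diff _ _ (PySem.Set.nodup_ofList _),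
            PySem.Set.nodup_diff _ _ (PySem.Set.nodup_ofList _), ?_⟩,
           PySem.Set.nodup_inter _ _ (PySem.Set.nodup_ofList _), ?_⟩
    · intro a ha b hb he
      rw [PySem.Set.mem_diff, PySem.Set.mem_ofList, PySem.Set.mem_ofList] at ha hb
      exact ha.2 (he ▸ hb.1)
    · intro a ha b hb he
      rw [List.mem_append] at ha
      rw [PySem.Set.mem_inter, PySem.Set.mem_ofList, PySem.Set.mem_ofList] at hb
      rcases ha with ha | ha <;>
        rw [PySem.Set.mem_diff, PySem.Set.mem_ofList, PySem.Set.mem_ofList] at ha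
      · exact ha.2 (he ▸ hb.1)
      · exact ha.2 (he ▸ hb.2)
  have hperm : (PySem.List.sorted
      (PySem.Set.union (PySem.Set.ofList (os.map Prod.fst)) (PySem.Set.ofList (ns.map Prod.fst)))
      (fun k => k) false).Perm
      ((PySem.Set.diff (PySem.Set.ofList (ns.map Prod.fst)) (PySem.Set.ofList (os.map Prod.fst)))
        ++ (PySem.Set.diff (PySem.Set.ofList (os.map Prod.fst)) (PySem.Set.ofList (ns.map Prod.fst)))
        ++ (PySem.Set.inter (PySem.Set.ofList (os.map Prod.fst)) (PySem.Set.ofList (ns.map Prod.fst)))) := by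
    rw [List.perm_ext_iff_of_nodup ndall ndparts]
    intro a
    rw [List.Perm.mem_iff (PySem.List.sorted_perm _ _ _)]
    simp only [List.mem_append, PySem.Set.mem_union, PySem.Set.mem_diff, PySem.Set.mem_inter,
      PySem.Set.mem_ofList]
    tauto
  have e1 : ((PySem.Set.diff (PySem.Set.ofList (ns.map Prod.fst)) (PySem.Set.ofList (os.map Prod.fst))).filterMap (pvClassify os ns))
      = (PySem.Set.diff (PySem.Set.ofList (ns.map Prod.fst)) (PySem.Set.ofList (os.map Prod.fst))).map pvAddedRec := by
    refine Eq.trans (List.filterMap_congr (g := some ∘ pvAddedRec) ?_) (congrFun List.filterMap_eq_map _)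
    intro k hk
    rw [PySem.Set.mem_diff, PySem.Set.mem_ofList, PySem.Set.mem_ofList] at hk
    exact pv_classify_added os ns k hk.2 hk.1
  have e2 : ((PySem.Set.diff (PySem.Set.ofList (os.map Prod.fst)) (PySem.Set.ofList (ns.map Prod.fst))).filterMap (pvClassify os ns))
      = (PySem.Set.diff (PySem.Set.ofList (os.map Prod.fst)) (PySem.Set.ofList (ns.map Prod.fst))).map pvRemovedRec := by
    refine Eq.trans (List.filterMap_congr (g := some ∘ pvRemovedRec) ?_) (congrFun List.filterMap_eq_map _)
    intro k hk
    rw [PySem.Set.mem_diff, PySem.Set.mem_ofList, PySem.Set.mem_ofList] at hk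
    exact pv_classify_removed os ns k hk.1 hk.2
  have e3 : ((PySem.Set.inter (PySem.Set.ofList (os.map Prod.fst)) (PySem.Set.ofList (ns.map Prod.fst))).filterMap (pvClassify os ns))
      = (PySem.Set.inter (PySem.Set.ofList (os.map Prod.fst)) (PySem.Set.ofList (ns.map Prod.fst))).filterMap (pvChangedF os ns) := by
    refine List.filterMap_congr ?_
    intro k hk
    rw [PySem.Set.mem_inter, PySem.Set.mem_ofList, PySem.Set.mem_ofList] at hk
    exact pv_classify_common os ns k hk.1 hk.2
  have hpermF := hperm.filterMap (pvClassify os ns)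
  rw [List.filterMap_append, List.filterMap_append, e1, e2, e3] at hpermF
  have hlt : (PySem.List.sorted
      (PySem.Set.union (PySem.Set.ofList (os.map Prod.fst)) (PySem.Set.ofList (ns.map Prod.fst)))
      (fun k => k) false).Pairwise (fun a b => a < b) :=
    ((PySem.List.sorted_pairwise _ _).and ndall).imp (fun h => lt_of_le_of_ne h.1 h.2)
  have hpw : ((PySem.List.sorted
      (PySem.Set.union (PySem.Set.ofList (os.map Prod.fst)) (PySem.Set.ofList (ns.map Prod.fst)))
      (fun k => k) false).filterMap (pvClassify os ns)).Pairwise (fun a b => pvKeyOf a < pvKeyOf b) := by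
    rw [List.pairwise_filterMap]
    exact hlt.imp (fun hab b hb b' hb' => by
      rw [pv_keyOf_classify _ _ _ _ hb, pv_keyOf_classify _ _ _ _ hb']
      exact hab)
  rw [hA, hB]
  exact (PySem.List.sorted_eq_of_perm_of_pairwise_lt _ _ _ hpermF hpw).symm

-- ===== VERDICT (by name: the statement is the Claim_ definition above) =====
theorem diff_guideline_snapshots_spec : Claim_equal_diff_guideline_snapshots := by
  intro os ns _
  exact pv_main os ns
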